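-- pv_equiv track=rewrite | github.com/711mt/SPA | gradivo do binarnog stabla/II nedelja - rekurzija/rekurzija.py | most_upper
-- ===== SOURCE A (Python) =====
-- def count_uppercase(s):
--     if not s:
--         return 0
--     return (1 if s[0].isupper() else 0) + count_uppercase(s[1:])
--
-- def most_upper(recenica, max_recenica="", max_brojac=0):
--     if not recenica:
--         return max_recenica
--     current_recenica = recenica[0]
--     current_brojanje = count_uppercase(current_recenica)
--     if current_brojanje > max_brojac:
--         return most_upper(recenica[1:], current_recenica, current_brojanje)
--     else:
--         return most_upper(recenica[1:], max_recenica, max_brojac)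
-- ===== SOURCE B (Python) =====
-- def most_upper(recenica, max_recenica="", max_brojac=0):
--     for current in recenica:
--         cnt = sum(1 for c in current if c.isupper())
--         if cnt > max_brojac:
--             max_recenica, max_brojac = current, cnt
--     return max_recenica
-- ===== Notes on version B (the rewrite author's own statement) =====
-- stated objective: faster
-- what changed: Replaces the two accumulator-passing recursions (one per character via s[1:] slicing, one per sentence) with a single iterative loop maintaining a running best, counting uppercase letters with a generator-sum.
import Mathlib
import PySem

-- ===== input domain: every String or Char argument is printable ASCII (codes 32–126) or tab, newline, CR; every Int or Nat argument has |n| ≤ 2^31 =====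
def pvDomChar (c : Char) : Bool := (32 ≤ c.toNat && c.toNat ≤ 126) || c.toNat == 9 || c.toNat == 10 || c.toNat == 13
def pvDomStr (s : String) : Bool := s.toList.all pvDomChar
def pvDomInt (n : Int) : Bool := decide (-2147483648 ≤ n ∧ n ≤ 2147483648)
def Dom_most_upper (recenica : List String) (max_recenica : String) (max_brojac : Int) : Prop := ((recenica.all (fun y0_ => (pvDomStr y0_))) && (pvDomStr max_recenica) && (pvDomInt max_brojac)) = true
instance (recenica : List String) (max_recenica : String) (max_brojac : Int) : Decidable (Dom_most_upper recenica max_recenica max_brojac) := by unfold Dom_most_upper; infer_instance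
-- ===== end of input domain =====

-- B: one iterative pass with a running best and a generator-sum uppercase count, replacing A's two recursions (idiomatic; same return value).
-- ===== PORT A =====
def count_uppercase (s : List Char) : Int :=
  match s with
  | [] => 0
  | c :: t => (if PySem.Chars.isupper c then 1 else 0) + count_uppercase t

def most_upper (recenica : List String) (max_recenica : String) (max_brojac : Int) : String :=
  match recenica with
  | [] => max_recenica
  | current :: rest =>
    let current_brojanje := count_uppercase current.toList
    if current_brojanje > max_brojac then
      most_upper rest current current_brojanje
    else
      most_upper rest max_recenica max_brojac

-- ===== PORT B =====
-- cnt = sum(1 for c in current if c.isupper())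
def upper_sum (s : List Char) : Int :=
  s.foldl (fun acc c => if PySem.Chars.isupper c then acc + 1 else acc) 0

def most_upper_alt (recenica : List String) (max_recenica : String) (max_brojac : Int) : String :=
  (recenica.foldl
    (fun st current =>
      let cnt := upper_sum current.toList
      if cnt > st.2 then (current, cnt) else st)
    (max_recenica, max_brojac)).1

-- ===== PRECONDITION & SPEC =====
def Spec_most_upper (recenica : List String) (max_recenica : String) (max_brojac : Int) (out : String) : Prop := out = most_upper_alt recenica max_recenica max_brojac
instance (recenica : List String) (max_recenica : String) (max_brojac : Int) (out : String) : Decidable (Spec_most_upper recenica max_recenica max_brojac out) := by unfold Spec_most_upper; infer_instance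

-- ===== CLAIM (what is proved, stated in full; the proofs are below) =====
def Claim_equal_most_upper : Prop := ∀ (recenica : List String) (max_recenica : String) (max_brojac : Int), Dom_most_upper recenica max_recenica max_brojac → Spec_most_upper recenica max_recenica max_brojac (most_upper recenica max_recenica max_brojac)

-- ===== LEMMAS AND PROOFS =====

-- ===== VERDICT (by name: the statement is the Claim_ definition above) =====
lemma upper_sum_acc (s : List Char) (a : Int) :
    s.foldl (fun acc c => if PySem.Chars.isupper c then acc + 1 else acc) a
      = a + count_uppercase s := by
  induction s generalizing a with
  | nil => simp [count_uppercase]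
  | cons c t ih => simp [count_uppercase, ih]; split_ifs <;> ring

lemma counts_agree (s : List Char) : upper_sum s = count_uppercase s := by
  simpa using upper_sum_acc s 0

lemma most_upper_eq (recenica : List String) (b : String) (m : Int) :
    most_upper recenica b m = most_upper_alt recenica b m := by
  induction recenica generalizing b m with
  | nil => rfl
  | cons cur rest ih =>
    simp only [most_upper, most_upper_alt, List.foldl_cons]
    rw [counts_agree cur.toList]
    split_ifs with h
    · exact ih cur (count_uppercase cur.toList)
    · exact ih b m

theorem most_upper_spec : Claim_equal_most_upper := by
  intro recenica b m _
  exact most_upper_eq recenica b m
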